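-- pv_equiv track=rewrite | github.com/bhavesh-09/addskilleetcode | Hackathons/sherlockarray.py | balancedSums
-- ===== SOURCE A (Python) =====
-- def balancedSums(A):
--     n = len(A)
--     s = sum(A)
--     l = 0
--     for x, i in zip(A, range(n)):
--         # r = s - x - l
--         if s - x - l - l == 0:
--             return True
--         l += x
--     return False
-- ===== SOURCE B (Python) =====
-- def balancedSums(A):
--     for i in range(len(A)):
--         if sum(A[:i]) == sum(A[i+1:]):
--             return True
--     return False
-- ===== Notes on version B (the rewrite author's own statement) =====
-- stated objective: simpler
-- what changed: Replaces the single pass maintaining a running left sum (compared against the precomputed total) with a plain index loop that recomputes the left and right slice sums afresh at each pivot.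
import Mathlib
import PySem

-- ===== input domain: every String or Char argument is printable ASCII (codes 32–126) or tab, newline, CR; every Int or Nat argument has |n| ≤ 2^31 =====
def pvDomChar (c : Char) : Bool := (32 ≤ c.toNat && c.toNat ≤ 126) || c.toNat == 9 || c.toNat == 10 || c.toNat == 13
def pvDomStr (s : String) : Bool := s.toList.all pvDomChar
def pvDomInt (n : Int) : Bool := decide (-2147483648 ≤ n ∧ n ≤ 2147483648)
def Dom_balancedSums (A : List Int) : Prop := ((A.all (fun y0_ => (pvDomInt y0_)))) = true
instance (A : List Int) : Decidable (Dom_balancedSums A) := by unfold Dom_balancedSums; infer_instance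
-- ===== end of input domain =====

-- B replaces A's single pass with a running left sum by a plain index loop that
-- recomputes the left and right slice sums afresh at each pivot (objective: simpler).


-- ===== PORT A =====
-- A's loop: zip(A, range(n)) walks A (the index i is unused); state l is the running left sum.
def goA_balancedSums (s : Int) : List Int → Int → Bool
  | [], _ => false
  | x :: rest, l => if s - x - l - l == 0 then true else goA_balancedSums s rest (l + x)

def balancedSums (A : List Int) : Bool :=
  goA_balancedSums A.sum A 0

-- ===== PORT B =====
-- B's loop: for i in range(len(A)), compare sum(A[:i]) with sum(A[i+1:]) afresh.
def goB_balancedSums (A : List Int) : List Int → Bool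
  | [] => false
  | i :: rest =>
    if (PySem.List.slice A none (some i)).sum == (PySem.List.slice A (some (i + 1)) none).sum
    then true else goB_balancedSums A rest

def balancedSums_alt (A : List Int) : Bool :=
  goB_balancedSums A (PySem.List.pyRange 0 (PySem.List.len A) 1)

-- ===== PRECONDITION & SPEC =====
def Spec_balancedSums (A : List Int) (out : Bool) : Prop := out = balancedSums_alt A
instance (A : List Int) (out : Bool) : Decidable (Spec_balancedSums A out) := by unfold Spec_balancedSums; infer_instance

-- ===== CLAIM (what is proved, stated in full; the proofs are below) =====
def Claim_equal_balancedSums : Prop := ∀ (A : List Int), Dom_balancedSums A → Spec_balancedSums A (balancedSums A)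

-- ===== LEMMAS AND PROOFS =====
lemma balancedSums_key (A0 : List Int) :
    ∀ (rest pre : List Int), A0 = pre ++ rest →
      goA_balancedSums A0.sum rest pre.sum =
        goB_balancedSums A0 (PySem.List.pyRange (pre.length : Int) (A0.length : Int) 1) := by
  intro rest
  induction rest with
  | nil =>
    intro pre hA
    have hlen : (A0.length : Int) = (pre.length : Int) := by simp [hA]
    rw [hlen, PySem.List.pyRange_one]
    simp [goA_balancedSums, goB_balancedSums]
  | cons x r ih =>
    intro pre hA
    have hlt : (pre.length : Int) < (A0.length : Int) := by
      simp [hA]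
    rw [PySem.List.pyRange_one_cons hlt]
    have hleft : PySem.List.slice A0 none (some (pre.length : Int)) = pre := by
      rw [PySem.List.slice_to_natCast, hA, List.take_left]
    have hright : PySem.List.slice A0 (some ((pre.length : Int) + 1)) none = r := by
      have : ((pre.length : Int) + 1) = ((pre.length + 1 : Nat) : Int) := by push_cast; ring
      rw [this, PySem.List.slice_from_natCast, hA]
      rw [show pre.length + 1 = pre.length + 1 from rfl]
      rw [← List.drop_drop, List.drop_left]
      rfl
    have hsum : A0.sum = pre.sum + (x + r.sum) := by rw [hA]; simp
    simp only [goA_balancedSums, goB_balancedSums, hleft, hright]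
    by_cases h : A0.sum - x - pre.sum - pre.sum = 0
    · have h2 : pre.sum = r.sum := by omega
      have hb : (A0.sum - x - pre.sum - pre.sum == 0) = true := by simp [h]
      have hb2 : (pre.sum == r.sum) = true := by simp [h2]
      simp only [hb, hb2, if_true]
    · have h2 : pre.sum ≠ r.sum := by omega
      have hb : (A0.sum - x - pre.sum - pre.sum == 0) = false := by simp [h]
      have hb2 : (pre.sum == r.sum) = false := by simp [h2]
      simp only [hb, hb2, if_false, Bool.false_eq_true]
      have hrec := ih (pre ++ [x]) (by simp [hA])
      simp only [List.sum_append, List.length_append, List.sum_cons, List.sum_nil,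
        List.length_cons, List.length_nil] at hrec
      norm_num at hrec
      exact hrec

-- ===== VERDICT (by name: the statement is the Claim_ definition above) =====
theorem balancedSums_spec : Claim_equal_balancedSums := by
  intro A _
  unfold Spec_balancedSums balancedSums balancedSums_alt
  have := balancedSums_key A A [] rfl
  simpa [PySem.List.len_eq] using this
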